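-- pv_equiv track=rewrite | github.com/djova/advent-of-code | 2019/python/06_Universal_Orbit_Map.py | count_orbits_for_node
-- ===== SOURCE A (Python) =====
-- def count_orbits_for_node(orbits, start):
--     stack = [start]
--     total = 0
--     while stack:
--         x = stack.pop()
--         if x in orbits:
--             total += 1
--             stack.append(orbits[x])
--     return total
-- ===== SOURCE B (Python) =====
-- def count_orbits_for_node(orbits, start):
--     if start not in orbits:
--         return 0
--     return 1 + count_orbits_for_node(orbits, orbits[start])
-- ===== Notes on version B (the rewrite author's own statement) =====
-- stated objective: simpler
-- what changed: B replaces A's explicit-stack while loop with a plain recursive definition (0 at the root, 1 + recurse on the parent), with no stack and no accumulator state.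
import Mathlib
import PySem

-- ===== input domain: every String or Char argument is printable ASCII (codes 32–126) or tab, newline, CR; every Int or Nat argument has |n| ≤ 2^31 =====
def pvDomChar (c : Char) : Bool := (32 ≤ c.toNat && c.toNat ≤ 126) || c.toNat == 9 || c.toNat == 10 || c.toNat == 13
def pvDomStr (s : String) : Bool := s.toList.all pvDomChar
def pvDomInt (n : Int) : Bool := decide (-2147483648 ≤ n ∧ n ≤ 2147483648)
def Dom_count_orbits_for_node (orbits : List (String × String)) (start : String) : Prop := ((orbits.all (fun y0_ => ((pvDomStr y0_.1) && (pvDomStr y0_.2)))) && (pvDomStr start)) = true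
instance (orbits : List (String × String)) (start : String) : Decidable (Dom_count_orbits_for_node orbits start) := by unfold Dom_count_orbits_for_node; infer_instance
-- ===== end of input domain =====

-- B replaces A's explicit-stack while loop and running total with a plain recursive
-- definition (0 at the root, 1 + recurse on the parent); same cost, no speed claim.

-- ===== PORT A =====
-- while stack: x = stack.pop(); if x in orbits: total += 1; stack.append(orbits[x])
-- The stack's top is kept at the head of the list (pop takes the head, append pushes a head);
-- fuel orbits.length + 1 bounds the iterations, which suffices on every terminating run.
def pvLoopA (d : PySem.Dict String String) : Nat → List String → Int → Int
  | 0, _, total => total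
  | _ + 1, [], total => total                     -- while stack: loop exits
  | n + 1, x :: stack, total =>
    match PySem.Dict.get? d x with                -- if x in orbits: total += 1; stack.append(orbits[x])
    | some p => pvLoopA d n (p :: stack) (total + 1)
    | none => pvLoopA d n stack total

def count_orbits_for_node (orbits : List (String × String)) (start : String) : Int :=
  pvLoopA (PySem.Dict.ofList orbits) (orbits.length + 1) [start] 0    -- stack = [start]; total = 0

-- ===== PORT B =====
-- if start not in orbits: return 0; return 1 + count_orbits_for_node(orbits, orbits[start])
-- Fuel orbits.length + 1 bounds the recursion depth, which suffices on every terminating run.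
def pvRecB (d : PySem.Dict String String) : Nat → String → Int
  | 0, _ => 0
  | n + 1, node =>
    match PySem.Dict.get? d node with
    | none => 0                                   -- if start not in orbits: return 0
    | some p => 1 + pvRecB d n p                  -- 1 + count_orbits_for_node(orbits, orbits[start])

def count_orbits_for_node_alt (orbits : List (String × String)) (start : String) : Int :=
  pvRecB (PySem.Dict.ofList orbits) (orbits.length + 1) start

-- ===== PRECONDITION & SPEC =====
def Spec_count_orbits_for_node (orbits : List (String × String)) (start : String) (out : Int) : Prop := out = count_orbits_for_node_alt orbits start
instance (orbits : List (String × String)) (start : String) (out : Int) : Decidable (Spec_count_orbits_for_node orbits start out) := by unfold Spec_count_orbits_for_node; infer_instance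

-- ===== CLAIM (what is proved, stated in full; the proofs are below) =====
def Claim_equal_count_orbits_for_node : Prop := ∀ (orbits : List (String × String)) (start : String), Dom_count_orbits_for_node orbits start → Spec_count_orbits_for_node orbits start (count_orbits_for_node orbits start)

-- ===== LEMMAS AND PROOFS =====
theorem pvLoopA_nil (d : PySem.Dict String String) (n : Nat) (total : Int) :
    pvLoopA d n [] total = total := by
  cases n <;> simp [pvLoopA]

theorem pvLoopA_eq_add_pvRecB (d : PySem.Dict String String) (n : Nat) (x : String) (total : Int) :
    pvLoopA d n [x] total = total + pvRecB d n x := by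
  induction n generalizing x total with
  | zero => simp [pvLoopA, pvRecB]
  | succ n ih =>
    simp only [pvLoopA, pvRecB]
    cases PySem.Dict.get? d x with
    | none => simpa using pvLoopA_nil d n total
    | some p => simp only []; rw [ih p (total + 1)]; ring

-- ===== VERDICT (by name: the statement is the Claim_ definition above) =====
theorem count_orbits_for_node_spec : Claim_equal_count_orbits_for_node := by
  intro orbits start _
  unfold Spec_count_orbits_for_node count_orbits_for_node count_orbits_for_node_alt
  simpa using pvLoopA_eq_add_pvRecB (PySem.Dict.ofList orbits) (orbits.length + 1) start 0
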